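-- pv_equiv track=rewrite | github.com/leeyounwoo/Algorithm | In SSAFY/0929/deu03093/1240_code/s1.py | find_code_i
-- ===== SOURCE A (Python) =====
-- def find_code_i(codes):
--     code_i_list = []
--     last_index = 0
--     for i in range(len(codes)):
--         for j in range(len(codes[i])-1, -1, -1):
--             if codes[i][j] == '1':
--                 last_index = j
--                 code_i_list.append(i)
--                 break
--     return (code_i_list, last_index)
-- ===== SOURCE B (Python) =====
-- def find_code_i(codes):
--     code_i_list = [i for i, row in enumerate(codes) if '1' in row]
--     if not code_i_list:
--         return (code_i_list, 0)
--     row = codes[code_i_list[-1]]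
--     return (code_i_list, len(row) - 1 - row[::-1].index('1'))
-- ===== Notes on version B (the rewrite author's own statement) =====
-- stated objective: simpler
-- what changed: Replaces the interleaved index loops (a Python-level reverse character scan per row updating last_index on every matching row) by a comprehension with a C-level substring membership test plus a single rightmost-'1' computation on the last matching row only.
import Mathlib
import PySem

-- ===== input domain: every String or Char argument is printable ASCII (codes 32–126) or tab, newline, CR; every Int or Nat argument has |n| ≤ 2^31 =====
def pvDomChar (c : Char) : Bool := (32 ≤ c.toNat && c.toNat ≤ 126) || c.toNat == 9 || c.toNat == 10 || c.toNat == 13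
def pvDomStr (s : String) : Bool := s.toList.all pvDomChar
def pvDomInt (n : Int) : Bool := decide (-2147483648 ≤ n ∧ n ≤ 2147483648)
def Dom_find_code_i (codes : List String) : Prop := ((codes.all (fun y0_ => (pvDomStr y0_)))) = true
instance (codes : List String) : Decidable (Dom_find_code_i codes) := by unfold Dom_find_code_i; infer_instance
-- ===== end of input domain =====

-- B separates the presence test ('1' in row) from a single rightmost-index computation on the
-- last matching row, instead of A's interleaved reverse inner scan per row; objective: simpler.

-- ===== PORT A =====
-- inner loop: for j in range(len(s)-1, -1, -1): if s[j] == '1': … break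
-- (argument = j+1, counting down; returns the j at which the loop breaks, none if it never breaks)
def scanRow (s : List Char) : Nat → Option Int
  | 0 => none
  | j + 1 => if PySem.List.pyGet? s (j : Int) = some '1' then some (j : Int) else scanRow s j

-- outer loop with the running state (code_i_list, last_index) and the current index i
def loopA : List String → Int → List Int × Int → List Int × Int
  | [], _, st => st
  | s :: rest, i, st =>
      match scanRow s.toList s.toList.length with
      | some j => loopA rest (i + 1) (st.1 ++ [i], j)
      | none   => loopA rest (i + 1) st

def find_code_i (codes : List String) : List Int × Int := loopA codes 0 ([], 0)

-- ===== PORT B =====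
-- the comprehension [i for i, row in enumerate(codes) if '1' in row]
def lstB (codes : List String) : List Int :=
  (PySem.List.enumerate codes 0).filterMap
    (fun p => if PySem.Str.isIn "1" p.2 then some p.1 else none)

-- the tail of B after the comprehension: the early return and the rightmost-'1' computation
def altRest (codes : List String) (lst : List Int) : List Int × Int :=
  match lst.getLast? with
  | none => (lst, 0)
  | some i =>
      -- codes[code_i_list[-1]]: i comes from enumerate, so it is always in range; default never used
      let row := ((PySem.List.pyGet? codes i).getD "").toList
      -- row[::-1].index('1'): '1' ∈ row by construction, so Python's .index cannot raise; default never used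
      match PySem.List.index? ((PySem.List.slice? row none none (-1)).getD []) '1' with
      | some k => (lst, (row.length : Int) - 1 - (k : Int))
      | none   => (lst, 0)

def find_code_i_alt (codes : List String) : List Int × Int := altRest codes (lstB codes)

-- ===== PRECONDITION & SPEC =====
def Spec_find_code_i (codes : List String) (out : List Int × Int) : Prop := out = find_code_i_alt codes
instance (codes : List String) (out : List Int × Int) : Decidable (Spec_find_code_i codes out) := by unfold Spec_find_code_i; infer_instance

-- ===== CLAIM (what is proved, stated in full; the proofs are below) =====
def Claim_equal_find_code_i : Prop := ∀ (codes : List String), Dom_find_code_i codes → Spec_find_code_i codes (find_code_i codes)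

-- ===== LEMMAS AND PROOFS =====

-- appending a character does not change the inner scan over the first j positions
theorem scanRow_append (s : List Char) (c : Char) (j : Nat) (hj : j ≤ s.length) :
    scanRow (s ++ [c]) j = scanRow s j := by
  induction j with
  | zero => rfl
  | succ j ih =>
    have hjs : j < s.length := hj
    have hget : PySem.List.pyGet? (s ++ [c]) (j : Int) = PySem.List.pyGet? s (j : Int) := by
      simp [PySem.List.pyGet?_natCast, List.getElem?_append_left hjs]
    simp only [scanRow, hget, ih (Nat.le_of_lt hjs)]

-- A's inner scan expressed through the reverse index B computes
theorem scanRow_eq_index (s : List Char) :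
    scanRow s s.length =
      match PySem.List.index? s.reverse '1' with
      | some k => some ((s.length : Int) - 1 - (k : Int))
      | none => none := by
  induction s using List.reverseRecOn with
  | nil => rfl
  | append_singleton s c ih =>
    have hlen : (s ++ [c]).length = s.length + 1 := by simp
    rw [hlen]
    by_cases hc : c = '1'
    · subst hc
      have hidx : PySem.List.index? (s ++ ['1']).reverse '1' = some 0 := by
        rw [List.reverse_append]
        simpa using PySem.List.index?_cons_self (x := '1') (xs := s.reverse)
      rw [hidx]
      simp [scanRow]
    · have hget : PySem.List.pyGet? (s ++ [c]) ((s.length : Nat) : Int) = some c :=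
        PySem.List.pyGet?_append_length (pre := s) (y := c) (ys := [])
      have hne : ¬ (PySem.List.pyGet? (s ++ [c]) ((s.length : Nat) : Int) = some '1') := by
        simp [hc]
      rw [show scanRow (s ++ [c]) (s.length + 1)
            = if PySem.List.pyGet? (s ++ [c]) ((s.length : Nat) : Int) = some '1'
              then some ((s.length : Nat) : Int) else scanRow (s ++ [c]) s.length from rfl,
          if_neg hne, scanRow_append s c s.length (le_refl _), ih]
      have hidx : PySem.List.index? (s ++ [c]).reverse '1'
          = (PySem.List.index? s.reverse '1').map (· + 1) := by
        rw [List.reverse_append]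
        simpa using PySem.List.index?_cons_of_ne (x := c) (v := '1') (xs := s.reverse) hc
      rw [hidx]
      cases h : PySem.List.index? s.reverse '1' with
      | none => simp
      | some k => simp; omega

-- the inner scan fails exactly when the row has no '1'
theorem scanRow_none_iff (s : List Char) :
    scanRow s s.length = none ↔ '1' ∉ s := by
  rw [scanRow_eq_index]
  cases h : PySem.List.index? s.reverse '1' with
  | none =>
    have h1 := (PySem.List.index?_eq_none_iff (xs := s.reverse) (v := '1')).mp h
    simp at h1 ⊢; exact h1
  | some k =>
    have h1 : '1' ∈ s.reverse := (PySem.List.index?_isSome_iff _ _).mp (by rw [h]; rfl)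
    simp at h1 ⊢; exact h1

-- '1' in row (a one-character substring test) is membership
theorem isIn_one_iff (s : String) : PySem.Str.isIn "1" s = true ↔ '1' ∈ s.toList := by
  rw [PySem.Str.isIn_iff_infix]
  constructor
  · intro h; exact h.mem (by simp [show ("1" : String).toList = ['1'] from rfl])
  · intro h
    obtain ⟨l, r, hlr⟩ := List.append_of_mem h
    exact ⟨l, r, by simp [hlr, show ("1" : String).toList = ['1'] from rfl]⟩

theorem lstB_append (codes : List String) (s : String) :
    lstB (codes ++ [s]) =
      lstB codes ++ (if PySem.Str.isIn "1" s then [(codes.length : Int)] else []) := by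
  unfold lstB
  rw [PySem.List.enumerate_append, List.filterMap_append]
  rw [PySem.List.enumerate_cons, PySem.List.enumerate_nil]
  simp only [List.filterMap_cons, List.filterMap_nil, Int.zero_add]
  by_cases h : PySem.Chars.isIn ['1'] s.toList = true <;> simp [h]

theorem lstB_mem_lt (codes : List String) (i : Int) (hi : i ∈ lstB codes) :
    0 ≤ i ∧ i < (codes.length : Int) := by
  unfold lstB at hi
  obtain ⟨p, hp, hpe⟩ := List.mem_filterMap.mp hi
  obtain ⟨k, hk, rfl⟩ := (PySem.List.mem_enumerate_iff _ _ _).mp hp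
  split at hpe
  · simp at hpe
    constructor <;> omega
  · simp at hpe

theorem altRest_fst (codes : List String) (lst : List Int) : (altRest codes lst).1 = lst := by
  unfold altRest
  cases h : lst.getLast? with
  | none => simp
  | some i =>
    simp only []
    split <;> rfl

theorem loopA_append (xs ys : List String) (i : Int) (st : List Int × Int) :
    loopA (xs ++ ys) i st = loopA ys (i + (xs.length : Int)) (loopA xs i st) := by
  induction xs generalizing i st with
  | nil => simp [loopA]
  | cons x xs ih =>
    have e : ∀ st', loopA ys (i + 1 + (xs.length : Int)) st'
        = loopA ys (i + ((x :: xs).length : Int)) st' := by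
      intro st'; congr 1; simp only [List.length_cons]; omega
    simp only [List.cons_append, loopA]
    cases h : scanRow x.toList x.toList.length with
    | some j => dsimp only; rw [ih, e]
    | none => dsimp only; rw [ih, e]

theorem main_eq (codes : List String) : find_code_i codes = find_code_i_alt codes := by
  induction codes using List.reverseRecOn with
  | nil => rfl
  | append_singleton codes s ih =>
    have hA : find_code_i (codes ++ [s])
        = loopA [s] (codes.length : Int) (find_code_i codes) := by
      unfold find_code_i
      rw [loopA_append]; norm_num
    cases hscan : scanRow s.toList s.toList.length with
    | none =>
      -- s has no '1': the new row is skipped on both sides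
      have hmem : '1' ∉ s.toList := (scanRow_none_iff s.toList).mp hscan
      have hisIn : PySem.Str.isIn "1" s = false :=
        Bool.eq_false_iff.mpr (fun h => hmem ((isIn_one_iff s).mp h))
      have hlst : lstB (codes ++ [s]) = lstB codes := by
        rw [lstB_append, hisIn]; simp
      rw [hA, ih]
      simp only [loopA, hscan]
      unfold find_code_i_alt altRest
      rw [hlst]
      cases hlast : (lstB codes).getLast? with
      | none => rfl
      | some i =>
        have hi : i ∈ lstB codes := List.mem_of_getLast? hlast
        obtain ⟨h0, hlt⟩ := lstB_mem_lt codes i hi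
        have hget : PySem.List.pyGet? (codes ++ [s]) i = PySem.List.pyGet? codes i := by
          rw [PySem.List.pyGet?_of_nonneg (codes ++ [s]) h0, PySem.List.pyGet?_of_nonneg codes h0,
              List.getElem?_append_left (by omega)]
        simp only [hget]
    | some j =>
      -- s contains '1': it becomes the new last matching row on both sides
      have hmem : '1' ∈ s.toList := by
        by_contra hmem
        rw [(scanRow_none_iff s.toList).mpr hmem] at hscan; exact absurd hscan (by simp)
      have hisIn : PySem.Str.isIn "1" s = true := (isIn_one_iff s).mpr hmem
      have hlst : lstB (codes ++ [s]) = lstB codes ++ [(codes.length : Int)] := by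
        rw [lstB_append, hisIn]; simp
      rw [hA]
      simp only [loopA, hscan]
      unfold find_code_i_alt altRest
      rw [hlst]
      have hlast : (lstB codes ++ [(codes.length : Int)]).getLast? = some (codes.length : Int) := by
        simp
      rw [hlast]
      have hget : PySem.List.pyGet? (codes ++ [s]) ((codes.length : Nat) : Int) = some s :=
        PySem.List.pyGet?_append_length (pre := codes) (y := s) (ys := [])
      simp only [hget, Option.getD_some]
      rw [PySem.List.slice?_none_none_neg_one, Option.getD_some]
      have hsc := scanRow_eq_index s.toList
      rw [hscan] at hsc
      cases hidx : PySem.List.index? s.toList.reverse '1' with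
      | none => rw [hidx] at hsc; exact absurd hsc.symm (by simp)
      | some k =>
        rw [hidx] at hsc
        have hj : j = (s.toList.length : Int) - 1 - (k : Int) := by
          have hlen2 : s.toList.length = s.length := by simp
          simp at hsc; omega
        have hfst : (find_code_i codes).1 = lstB codes := by
          rw [ih]; exact altRest_fst codes (lstB codes)
        rw [hfst, hj]

-- ===== VERDICT (by name: the statement is the Claim_ definition above) =====
theorem find_code_i_spec : Claim_equal_find_code_i := by
  intro codes _
  unfold Spec_find_code_i
  exact main_eq codes
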